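-- pv_equiv track=rewrite | github.com/jfwilliams95/AoC-2019 | day4.py | has_single_double
-- ===== SOURCE A (Python) =====
-- def has_single_double(digits):
--   # Make groups
--   groups = []
--
--   cur_group = []
--   for digit in digits:
--     # If there isn't a group, start one
--     if (len(cur_group) == 0):
--       cur_group.append(digit)
--     # Otherwise, check to see if it's part of the same group
--     else:
--       # If the digit is the same as the current group, add it in
--       if (cur_group[0] == digit):
--         cur_group.append(digit)
--       else:
--         # Otherwise, add in the current group, and start a new one
--         groups.append(cur_group)
--         cur_group = []
--         cur_group.append(digit)
--
--   # Add in the last digit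
--   groups.append(cur_group)
--
--   # If any of the groupings have two items, return true
--   for group in groups:
--     if len(group) == 2:
--       return True
--
--   return False
-- ===== SOURCE B (Python) =====
-- def has_single_double(digits):
--   prev = None
--   for i in range(len(digits) - 1):
--     x = digits[i]
--     y = digits[i + 1]
--     nxt = digits[i + 2] if i + 2 < len(digits) else None
--     if x == y and prev != x and nxt != x:
--       return True
--     prev = x
--   return False
-- ===== Notes on version B (the rewrite author's own statement) =====
-- stated objective: simpler
-- what changed: B replaces A's construction of explicit group lists with a single index scan that tests locally, via neighbor comparisons with bounds checks, whether a maximal run of length exactly two starts at each position; no group/count structures are built.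
import Mathlib
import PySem

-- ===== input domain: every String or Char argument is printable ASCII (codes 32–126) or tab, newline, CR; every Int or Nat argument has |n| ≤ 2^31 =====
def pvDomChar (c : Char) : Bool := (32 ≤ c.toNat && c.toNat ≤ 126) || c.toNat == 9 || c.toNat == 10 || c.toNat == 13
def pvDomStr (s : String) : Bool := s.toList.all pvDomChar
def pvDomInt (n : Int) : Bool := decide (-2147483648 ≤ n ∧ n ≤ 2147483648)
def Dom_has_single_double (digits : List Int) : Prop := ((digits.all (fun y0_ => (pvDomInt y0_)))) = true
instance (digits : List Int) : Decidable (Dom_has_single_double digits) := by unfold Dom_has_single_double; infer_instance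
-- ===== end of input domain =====

-- B replaces A's group-list construction with a local neighbor-comparison scan (objective: simpler).


-- ===== PORT A =====
-- one step of A's loop body: state = (groups, cur_group)
def stepA (st : List (List Int) × List Int) (digit : Int) : List (List Int) × List Int :=
  if st.2.length = 0 then (st.1, st.2 ++ [digit])
  else if st.2.headD 0 = digit then (st.1, st.2 ++ [digit])  -- cur_group[0]; cur_group is nonempty in this branch
  else (st.1 ++ [st.2], [digit])

def has_single_double (digits : List Int) : Bool :=
  let st := digits.foldl stepA ([], [])
  -- groups.append(cur_group); then the early-return scan for a group of length 2
  (st.1 ++ [st.2]).any (fun g => decide (g.length = 2))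

-- ===== PORT B =====
-- the for-loop over i in range(len(digits)-1), carrying prev; early return on a local exactly-two run
def altGo (digits : List Int) (prev : Option Int) (i : Nat) : Bool :=
  if _h : i + 1 < digits.length then
    let x := digits.getD i 0          -- digits[i], i in range here
    let y := digits.getD (i+1) 0      -- digits[i+1], in range here
    let nxt : Option Int := if i + 2 < digits.length then some (digits.getD (i+2) 0) else none
    if x = y ∧ prev ≠ some x ∧ nxt ≠ some x then true
    else altGo digits (some x) (i+1)
  else false
termination_by digits.length - i

def has_single_double_alt (digits : List Int) : Bool := altGo digits none 0

-- ===== PRECONDITION & SPEC =====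
def Spec_has_single_double (digits : List Int) (out : Bool) : Prop := out = has_single_double_alt digits
instance (digits : List Int) (out : Bool) : Decidable (Spec_has_single_double digits out) := by unfold Spec_has_single_double; infer_instance

-- ===== CLAIM (what is proved, stated in full; the proofs are below) =====
def Claim_equal_has_single_double : Prop := ∀ (digits : List Int), Dom_has_single_double digits → Spec_has_single_double digits (has_single_double digits)

-- ===== LEMMAS AND PROOFS =====

-- common characterization: current run has value v and length k, xs remains
def runOut (v : Int) (k : Nat) : List Int → Bool
  | [] => decide (k = 2)
  | x :: xs => if x = v then runOut v (k+1) xs else (decide (k = 2)) || runOut x 1 xs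

-- list-level rephrasing of B's index loop
def loc (prev : Option Int) : List Int → Bool
  | x :: y :: rest =>
    if x = y ∧ prev ≠ some x ∧ rest.head? ≠ some x then true
    else loc (some x) (y :: rest)
  | _ => false

theorem loc_short (p : Option Int) (l : List Int) (h : l.length ≤ 1) : loc p l = false := by
  match l with
  | [] => rfl
  | [x] => rfl
  | x :: y :: rest => simp at h

theorem altGo_eq_loc (digits : List Int) (p : Option Int) (i : Nat) :
    altGo digits p i = loc p (digits.drop i) := by
  rw [altGo]
  by_cases h : i + 1 < digits.length
  · have hi : i < digits.length := by omega
    have hd : digits.drop i = digits[i] :: digits.drop (i+1) := List.drop_eq_getElem_cons hi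
    have hd1 : digits.drop (i+1) = digits[i+1] :: digits.drop (i+2) := List.drop_eq_getElem_cons h
    have hx : digits.getD i 0 = digits[i] := List.getD_eq_getElem digits 0 hi
    have hy : digits.getD (i+1) 0 = digits[i+1] := List.getD_eq_getElem digits 0 h
    have hnxt : (if i + 2 < digits.length then some (digits.getD (i+2) 0) else none)
        = digits[i+2]? := by
      by_cases h2 : i + 2 < digits.length
      · simp [h2]
      · simp [h2]
    simp only [dif_pos h, hx, hy, hnxt]
    rw [hd, hd1]
    simp only [loc, List.head?_drop]
    split
    · rfl
    · rw [altGo_eq_loc digits (some digits[i]) (i+1), hd1]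
  · simp only [dif_neg h]
    exact (loc_short _ _ (by rw [List.length_drop]; omega)).symm
termination_by digits.length - i

-- master lemma relating B's local test to the run characterization
theorem loc_eq_runOut (xs : List Int) : ∀ (v : Int) (k : Nat) (p : Option Int),
    1 ≤ k → ((p = some v) ↔ 2 ≤ k) →
    ((decide (k = 2) && decide (xs.head? ≠ some v)) || loc p (v :: xs)) = runOut v k xs := by
  induction xs with
  | nil =>
    intro v k p hk hp
    rw [loc_short p [v] (by simp)]
    simp [runOut]
  | cons y ys ih =>
    intro v k p hk hp
    by_cases hy : y = v
    · subst hy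
      rw [runOut, if_pos rfl]
      rw [← ih y (k+1) (some y) (by omega) (by simp; omega)]
      rcases Nat.lt_or_ge k 2 with hk2 | hk2
      · -- k = 1: p ≠ some y
        have hk1 : k = 1 := by omega
        subst hk1
        have hpne : p ≠ some y := by
          intro hc; exact absurd (hp.mp hc) (by omega)
        rw [loc]
        by_cases hhead : ys.head? ≠ some y
        · simp [hpne, hhead]
        · simp only [not_not] at hhead
          simp [hpne, hhead]
      · -- k ≥ 2: p = some y, the local test at this position fails
        have hpe : p = some y := hp.mpr hk2
        rw [loc]
        have hno : ¬ (y = y ∧ p ≠ some y ∧ (ys.head? ≠ some y)) := by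
          intro ⟨_, hne, _⟩; exact hne hpe
        rw [if_neg hno]
        rcases Nat.lt_or_ge k 3 with hk3 | hk3
        · have hk2' : k = 2 := by omega
          subst hk2'
          by_cases hhead : ys.head? = some y
          · simp [hhead]
          · simp [hhead]
        · have h1 : ¬ (k = 2) := by omega
          have h2 : ¬ (k + 1 = 2) := by omega
          simp [h1, h2]
    · -- run ends here
      have hstep : loc p (v :: y :: ys) = loc (some v) (y :: ys) := by
        rw [loc]
        rw [if_neg (by intro ⟨h1, _⟩; exact hy h1.symm)]
      by_cases hk2 : k = 2
      · have h1 : runOut v k (y :: ys) = true := by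
          rw [runOut, if_neg hy]; simp [hk2]
        rw [h1]
        simp [hk2, hy]
      · have hih := ih y 1 (some v) (by omega) (by constructor <;> intro hh <;> simp_all)
        simp only [Nat.reduceEqDiff, Bool.false_and, decide_false, Bool.false_or] at hih
        rw [runOut, if_neg hy, hstep]
        simp [hk2, hih]

-- A's fold, run by run: cur_group is a constant run of k copies of v
theorem foldA_eq_runOut (xs : List Int) : ∀ (groups : List (List Int)) (v : Int) (k : Nat),
    1 ≤ k →
    (let st := xs.foldl stepA (groups, List.replicate k v)
     (st.1 ++ [st.2]).any (fun g => decide (g.length = 2)))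
    = (groups.any (fun g => decide (g.length = 2)) || runOut v k xs) := by
  induction xs with
  | nil =>
    intro groups v k hk
    simp [runOut, List.any_append]
  | cons x xs ih =>
    intro groups v k hk
    simp only [List.foldl_cons]
    have hlen : ¬ ((List.replicate k v).length = 0) := by simp; omega
    have hhead : (List.replicate k v).headD 0 = v := by
      cases k with
      | zero => omega
      | succ n => simp [List.replicate_succ]
    by_cases hx : v = x
    · subst hx
      have hst : stepA (groups, List.replicate k v) v = (groups, List.replicate (k+1) v) := by
        simp only [stepA]
        rw [if_neg hlen, hhead, if_pos rfl, ← List.replicate_succ']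
      rw [hst, ih groups v (k+1) (by omega), runOut, if_pos rfl]
    · have hst : stepA (groups, List.replicate k v) x = (groups ++ [List.replicate k v], [x]) := by
        simp only [stepA]
        rw [if_neg hlen, hhead, if_neg hx]
      rw [hst]
      have h1 : ([x] : List Int) = List.replicate 1 x := by simp
      rw [h1, ih (groups ++ [List.replicate k v]) x 1 (by omega)]
      rw [runOut, if_neg (fun h => hx h.symm)]
      simp [List.any_append, Bool.or_assoc]

theorem a_eq_b (digits : List Int) : has_single_double digits = has_single_double_alt digits := by
  cases digits with
  | nil =>
    rw [show has_single_double [] = false from rfl, has_single_double_alt, altGo]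
    simp
  | cons v xs =>
    have hB : has_single_double_alt (v :: xs) = loc none (v :: xs) := by
      rw [has_single_double_alt, altGo_eq_loc]; rfl
    have hB2 : loc none (v :: xs) = runOut v 1 xs := by
      have := loc_eq_runOut xs v 1 none (by omega) (by simp)
      simpa using this
    have hA : has_single_double (v :: xs) = runOut v 1 xs := by
      rw [has_single_double]
      simp only [List.foldl_cons]
      have hstep : stepA ([], []) v = ([], List.replicate 1 v) := by simp [stepA]
      rw [hstep]
      have := foldA_eq_runOut xs [] v 1 (by omega)
      simpa using this
    rw [hA, hB, hB2]

-- ===== VERDICT (by name: the statement is the Claim_ definition above) =====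
theorem has_single_double_spec : Claim_equal_has_single_double := by
  intro digits _
  unfold Spec_has_single_double
  exact a_eq_b digits
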